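-- pv_equiv track=rewrite | github.com/miche715/algorithm-practice | python/p_140108.py | solution
-- ===== SOURCE A (Python) =====
-- def solution(string):
--     answer = 0
--
--     while string:
--         targrt = string[0]
--         num = [0, 0]
--         flag = False
--         for i in range(len(string)):
--             if string[i] == targrt:
--                 num[0] = num[0] + 1
--             else:
--                 num[1] = num[1] + 1
--             if num[0] == num[1]:
--                 string = string[i + 1:]
--                 flag = True
--                 break
--         if not flag:
--             string = ""
--         answer = answer + 1
--
--     return answer
-- ===== SOURCE B (Python) =====
-- def solution(string):
--     answer = 0
--     same = 0
--     diff = 0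
--     target = ' '
--     for c in string:
--         if same == 0 and diff == 0:
--             target = c
--         if c == target:
--             same = same + 1
--         else:
--             diff = diff + 1
--         if same == diff:
--             answer = answer + 1
--             same = 0
--             diff = 0
--     if same or diff:
--         answer = answer + 1
--     return answer
-- ===== Notes on version B (the rewrite author's own statement) =====
-- stated objective: faster
-- what changed: replaces the restart-and-rescan while loop with repeated slicing by a single linear pass that keeps running same/diff counters, resets them at each balance point, and counts one trailing unbalanced group
import Mathlib
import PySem

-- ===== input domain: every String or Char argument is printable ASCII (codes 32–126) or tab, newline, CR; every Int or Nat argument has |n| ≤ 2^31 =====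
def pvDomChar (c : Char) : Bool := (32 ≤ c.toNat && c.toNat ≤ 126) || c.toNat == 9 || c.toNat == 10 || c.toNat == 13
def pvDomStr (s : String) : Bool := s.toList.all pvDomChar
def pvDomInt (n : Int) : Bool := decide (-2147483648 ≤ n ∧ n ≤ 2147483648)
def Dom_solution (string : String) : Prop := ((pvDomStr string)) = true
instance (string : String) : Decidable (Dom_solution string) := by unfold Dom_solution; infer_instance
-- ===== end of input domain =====

-- B is a single linear pass with running same/diff counters (reset at each balance point,
-- one trailing unbalanced group counted at the end), replacing A's rescan-and-slice loop: faster.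

-- ===== PORT A =====
-- inner for-loop of A: scans, updating num = [n0, n1]; `some rest` = break with string[i+1:], `none` = loop ran out (flag stays False)
def aInner (target : Char) (l : List Char) (n0 n1 : Int) : Option (List Char) :=
  match l with
  | [] => none
  | c :: rest =>
    let n0' := if c = target then n0 + 1 else n0
    let n1' := if c = target then n1 else n1 + 1
    if n0' = n1' then some rest else aInner target rest n0' n1'

-- `some rest` is a strict suffix (needed for aOuter's termination)
theorem aInner_length_lt (target : Char) : ∀ (l r : List Char) (n0 n1 : Int),
    aInner target l n0 n1 = some r → r.length < l.length := by
  intro l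
  induction l with
  | nil => intro r n0 n1 h; simp [aInner] at h
  | cons c rest ih =>
    intro r n0 n1 h
    simp only [aInner] at h
    split_ifs at h
    all_goals first
      | (cases h; simp)
      | exact Nat.lt_trans (ih r _ _ h) (by simp)

-- outer while-loop of A
def aOuter (l : List Char) (answer : Int) : Int :=
  match hl : l with
  | [] => answer
  | c :: _ =>
    match h : aInner c l 0 0 with
    | some rest => aOuter rest (answer + 1)
    | none => answer + 1
termination_by l.length
decreasing_by exact aInner_length_lt _ _ _ _ _ (hl ▸ h)

def solution (string : String) : Int := aOuter string.toList 0

-- ===== PORT B =====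
-- one fold step of B's for-loop; state = (answer, same, diff, target)
def bStep (st : Int × Int × Int × Char) (c : Char) : Int × Int × Int × Char :=
  let (a, same, diff, t) := st
  let t' := if same = 0 ∧ diff = 0 then c else t
  let same' := if c = t' then same + 1 else same
  let diff' := if c = t' then diff else diff + 1
  if same' = diff' then (a + 1, 0, 0, t') else (a, same', diff', t')

def bFinal (st : Int × Int × Int × Char) : Int :=
  let (a, same, diff, _) := st
  if same ≠ 0 ∨ diff ≠ 0 then a + 1 else a

def solution_alt (string : String) : Int :=
  bFinal (string.toList.foldl bStep (0, 0, 0, ' '))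

-- ===== PRECONDITION & SPEC =====
def Spec_solution (string : String) (out : Int) : Prop := out = solution_alt string
instance (string : String) (out : Int) : Decidable (Spec_solution string out) := by unfold Spec_solution; infer_instance

-- ===== CLAIM (what is proved, stated in full; the proofs are below) =====
def Claim_equal_solution : Prop := ∀ (string : String), Dom_solution string → Spec_solution string (solution string)

-- ===== LEMMAS AND PROOFS =====

-- within a group (counts unequal, hence not both zero): the fold tracks aInner exactly
theorem fold_inner (t : Char) : ∀ (l : List Char) (n0 n1 a : Int), n0 ≠ n1 →
    bFinal (l.foldl bStep (a, n0, n1, t)) =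
      match aInner t l n0 n1 with
      | some rest => bFinal (rest.foldl bStep (a + 1, 0, 0, t))
      | none => a + 1 := by
  intro l
  induction l with
  | nil =>
    intro n0 n1 a hne
    simp only [List.foldl, aInner, bFinal]
    have : n0 ≠ 0 ∨ n1 ≠ 0 := by rcases eq_or_ne n0 0 with h | h <;> [right; left] <;> omega
    simp [this]
  | cons c rest ih =>
    intro n0 n1 a hne
    have hnb : ¬ (n0 = 0 ∧ n1 = 0) := by rintro ⟨h0, h1⟩; exact hne (h0.trans h1.symm)
    simp only [List.foldl, aInner, bStep, hnb, if_false]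
    by_cases hc : c = t
    · simp only [hc, if_true]
      by_cases hb : n0 + 1 = n1
      · simp [hb]
      · simp only [hb, if_false]; exact ih _ _ _ hb
    · simp only [if_neg hc]
      by_cases hb : n0 = n1 + 1
      · simp [hb]
      · simp only [hb, if_false]; exact ih _ _ _ hb

-- equation lemmas for aOuter's dependent match
theorem aOuter_some {c : Char} {rest r : List Char} (a : Int)
    (h : aInner c (c :: rest) 0 0 = some r) : aOuter (c :: rest) a = aOuter r (a + 1) := by
  rw [aOuter]; split <;> simp_all

theorem aOuter_none {c : Char} {rest : List Char} (a : Int)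
    (h : aInner c (c :: rest) 0 0 = none) : aOuter (c :: rest) a = a + 1 := by
  rw [aOuter]; split <;> simp_all

-- main equivalence, by strong induction on the length (aOuter consumes a strict suffix each round)
theorem main_eq : ∀ (n : Nat) (l : List Char) (a : Int) (t : Char), l.length ≤ n →
    bFinal (l.foldl bStep (a, 0, 0, t)) = aOuter l a := by
  intro n
  induction n with
  | zero =>
    intro l a t hlen
    have : l = [] := List.eq_nil_of_length_eq_zero (Nat.le_zero.mp hlen)
    subst this
    simp [aOuter, bFinal]
  | succ m ih =>
    intro l a t hlen
    match l with
    | [] => simp [aOuter, bFinal]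
    | c :: rest =>
      -- first step of the fold: counters are 0,0 so target := c, then same = 1, diff = 0
      have hstep : bStep (a, 0, 0, t) c = (a, 1, 0, c) := by
        simp [bStep]
      -- one step of aInner on the full list
      have hinner : aInner c (c :: rest) 0 0 = aInner c rest 1 0 := by
        simp [aInner]
      rw [show (c :: rest).foldl bStep (a, 0, 0, t) = rest.foldl bStep (a, 1, 0, c) by
            simp [List.foldl, hstep]]
      rw [fold_inner c rest 1 0 a (by omega)]
      cases hres : aInner c rest 1 0 with
      | some r =>
        rw [aOuter_some a (hinner.trans hres)]
        have hlt : r.length < rest.length := aInner_length_lt c rest r 1 0 hres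
        have : r.length ≤ m := by simp at hlen; omega
        exact ih r (a + 1) c this
      | none =>
        rw [aOuter_none a (hinner.trans hres)]

-- ===== VERDICT (by name: the statement is the Claim_ definition above) =====
theorem solution_spec : Claim_equal_solution := by
  intro s _
  unfold Spec_solution solution solution_alt
  exact (main_eq s.toList.length s.toList 0 ' ' le_rfl).symm
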